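-- pv_equiv track=rewrite | github.com/amnchhoker/Deadlock-Prevention-Toolkit | detection.py | run_detection_algorithm
-- ===== SOURCE A (Python) =====
-- from typing import List, Tuple
--
-- Matrix = List[List[int]]
--
-- Vector = List[int]
--
-- def run_detection_algorithm(allocation: Matrix, request: Matrix, available: Vector) -> Tuple[bool, List[int]]:
--     """Detect deadlocked processes using Work/Finish algorithm."""
--     process_count = len(allocation)
--     work = available[:]
--     finish = [False] * process_count
--
--     for p_idx in range(process_count):
--         if all(allocation[p_idx][r_idx] == 0 for r_idx in range(len(available))):
--             finish[p_idx] = True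
--
--     progress = True
--     while progress:
--         progress = False
--         for p_idx in range(process_count):
--             if finish[p_idx]:
--                 continue
--
--             can_satisfy = all(request[p_idx][r_idx] <= work[r_idx] for r_idx in range(len(work)))
--             if can_satisfy:
--                 for r_idx in range(len(work)):
--                     work[r_idx] += allocation[p_idx][r_idx]
--                 finish[p_idx] = True
--                 progress = True
--
--     deadlocked = [idx for idx, done in enumerate(finish) if not done]
--     return (len(deadlocked) > 0), deadlocked
-- ===== SOURCE B (Python) =====
-- from typing import List, Tuple
--
-- Matrix = List[List[int]]
-- Vector = List[int]
--
-- def run_detection_algorithm(allocation: Matrix, request: Matrix, available: Vector) -> Tuple[bool, List[int]]: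
--     """Deadlock detection with watched blocking resources: each still-blocked
--     process remembers one resource that blocked it last time (SAT watched-literal
--     style); a pass rechecks only that watched resource and rescans the whole
--     request row only when the watched resource's stock has grown enough."""
--     n = len(available)
--     work = available[:]
--     pending = [(p, None) for p in range(len(allocation))
--                if any(allocation[p][r] != 0 for r in range(n))]
--     progress = True
--     while progress:
--         progress = False
--         remaining = []
--         for p, watch in pending:
--             if watch is not None and request[p][watch] > work[watch]:
--                 remaining.append((p, watch))    # watched resource still short: skip the scan
--                 continue
--             blocker = None
--             for r in range(n):
--                 if request[p][r] > work[r]: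
--                     blocker = r
--                     break
--             if blocker is None:
--                 for r in range(n):
--                     work[r] += allocation[p][r]
--                 progress = True
--             else:
--                 remaining.append((p, blocker))
--         pending = remaining
--     deadlocked = [p for p, _ in pending]
--     return (len(deadlocked) > 0), deadlocked
-- ===== Notes on version B (the rewrite author's own statement) =====
-- stated objective: alternative
-- what changed: Replaces A's finish-flag array with full recheck of every process in every pass by a worklist of (process, watched blocking resource) pairs, SAT watched-literal style: a pass rechecks a blocked process against its single watched resource and rescans its request row only when that resource's stock has grown, and the deadlocked list is the final worklist itself.
-- outside the precondition, e.g. on run_detection_algorithm([[1, 1]], [[5]], [0, 0]): A returns (True, [0]), B returns (True, [0]); on run_detection_algorithm([[1]], [[0]], [0, 0]): A raises IndexError, B raises IndexError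
import Mathlib
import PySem

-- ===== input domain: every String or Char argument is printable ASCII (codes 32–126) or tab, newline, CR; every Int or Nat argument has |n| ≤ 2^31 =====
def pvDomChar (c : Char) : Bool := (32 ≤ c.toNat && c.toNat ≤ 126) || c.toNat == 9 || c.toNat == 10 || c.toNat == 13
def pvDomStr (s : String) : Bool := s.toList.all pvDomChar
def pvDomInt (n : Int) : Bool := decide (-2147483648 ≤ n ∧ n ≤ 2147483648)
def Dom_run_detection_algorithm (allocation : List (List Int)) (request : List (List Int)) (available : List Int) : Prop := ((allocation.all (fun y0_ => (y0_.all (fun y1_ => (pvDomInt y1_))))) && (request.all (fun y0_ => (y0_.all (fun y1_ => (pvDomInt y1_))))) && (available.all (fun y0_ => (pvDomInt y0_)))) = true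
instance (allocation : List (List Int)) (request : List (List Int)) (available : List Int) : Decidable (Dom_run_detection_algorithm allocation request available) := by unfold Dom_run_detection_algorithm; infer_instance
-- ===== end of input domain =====

-- B replaces A's finish-flag array and full recheck of every process in every pass by a
-- worklist of (process, watched blocking resource) pairs, SAT watched-literal style: a
-- blocked process is rechecked against its watched resource alone and its request row is
-- rescanned only when that stock grew (objective: alternative structure, same exact result).
-- Indexing inside both ports uses getD: exact on Pre_ (all indices in range there);
-- outside Pre_ the Python may raise.

-- ===== PORT A =====
-- can_satisfy = all(request[p][r] <= work[r] for r in range(len(work)))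
def pvSatA (request : List (List Int)) (work : List Int) (p : Nat) : Bool :=
  (List.range work.length).all (fun r => decide ((request.getD p []).getD r 0 ≤ work.getD r 0))

-- for r in range(len(work)): work[r] += allocation[p][r]
def pvAddA (allocation : List (List Int)) (work : List Int) (p : Nat) : List Int :=
  (List.range work.length).map (fun r => work.getD r 0 + (allocation.getD p []).getD r 0)

-- one iteration of A's inner `for p_idx in range(process_count)` body
def pvStepA (allocation request : List (List Int)) :
    (List Int × List Bool × Bool) → Nat → (List Int × List Bool × Bool) :=
  fun s p =>
    if s.2.1.getD p false then s
    else if pvSatA request s.1 p then (pvAddA allocation s.1 p, s.2.1.set p true, true)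
    else s

-- one full sweep (`for p_idx in range(process_count)`), starting with progress = False
def pvPassA (allocation request : List (List Int)) (P : Nat) (w : List Int) (f : List Bool) :
    List Int × List Bool × Bool :=
  (List.range P).foldl (pvStepA allocation request) (w, f, false)

-- the `while progress` loop; fuel P+1 always suffices (each productive sweep finishes ≥ 1 process)
def pvLoopA (allocation request : List (List Int)) (P : Nat) :
    Nat → List Int → List Bool → List Int × List Bool
  | 0, w, f => (w, f)
  | fuel + 1, w, f =>
    let s := pvPassA allocation request P w f
    if s.2.2 then pvLoopA allocation request P fuel s.1 s.2.1 else (s.1, s.2.1)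

def run_detection_algorithm (allocation : List (List Int)) (request : List (List Int)) (available : List Int) : Bool × List Int :=
  let P := allocation.length
  -- for p in range(P): if all(allocation[p][r]==0 for r in range(len(available))): finish[p]=True
  let f0 := (List.range P).foldl
    (fun f p => if ((allocation.getD p []).take available.length).all (fun x => x == 0) then f.set p true else f)
    (List.replicate P false)
  let res := pvLoopA allocation request P (P + 1) available f0
  let deadlocked := ((List.range res.2.length).filter (fun p => ! res.2.getD p false)).map (fun p => Int.ofNat p)
  (decide (0 < deadlocked.length), deadlocked)

-- ===== PORT B =====
-- blocker = None; for r in range(n): if request[p][r] > work[r]: blocker = r; break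
def pvScanB (request : List (List Int)) (n : Nat) (work : List Int) (p : Nat) : Option Nat :=
  (List.range n).find? (fun r => decide (work.getD r 0 < (request.getD p []).getD r 0))

-- for r in range(n): work[r] += allocation[p][r]
def pvAddB (allocation : List (List Int)) (n : Nat) (work : List Int) (p : Nat) : List Int :=
  (List.range n).map (fun r => work.getD r 0 + (allocation.getD p []).getD r 0)

-- watch is not None and request[p][watch] > work[watch]
def pvWatchHit (request : List (List Int)) (work : List Int) (e : Nat × Option Nat) : Bool :=
  match e.2 with
  | some w0 => decide (work.getD w0 0 < (request.getD e.1 []).getD w0 0)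
  | none => false

-- body of `for p, watch in pending`; state = (work, remaining, progress)
def pvStepB (allocation request : List (List Int)) (n : Nat) :
    (List Int × List (Nat × Option Nat) × Bool) → (Nat × Option Nat) →
      (List Int × List (Nat × Option Nat) × Bool) :=
  fun s e =>
    if pvWatchHit request s.1 e then (s.1, s.2.1 ++ [e], s.2.2)
    else
      match pvScanB request n s.1 e.1 with
      | none => (pvAddB allocation n s.1 e.1, s.2.1, true)
      | some r => (s.1, s.2.1 ++ [(e.1, some r)], s.2.2)

-- the `while progress` loop over the worklist; fuel P+1 always suffices
def pvLoopB (allocation request : List (List Int)) (n : Nat) :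
    Nat → List Int → List (Nat × Option Nat) → List (Nat × Option Nat)
  | 0, _, pend => pend
  | fuel + 1, w, pend =>
    let s := pend.foldl (pvStepB allocation request n) (w, [], false)
    if s.2.2 then pvLoopB allocation request n fuel s.1 s.2.1 else s.2.1

def run_detection_algorithm_alt (allocation : List (List Int)) (request : List (List Int)) (available : List Int) : Bool × List Int :=
  let n := available.length
  let pend0 := ((List.range allocation.length).filter
    (fun p => (List.range n).any (fun r => (allocation.getD p []).getD r 0 != 0))).map
    (fun p => (p, (none : Option Nat)))
  let dead := (pvLoopB allocation request n (allocation.length + 1) available pend0).map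
    (fun e => Int.ofNat e.1)
  (decide (0 < dead.length), dead)

-- ===== PRECONDITION & SPEC =====
-- Pre_ excludes inputs where Python A raises IndexError: an allocation row shorter than
-- `available`, or a process with a nonzero allocation row whose request row is missing or
-- shorter than `available` — on some of the latter A (and B) still return, when short-circuit
-- evaluation happens never to index past the truncated row; that accidental completion
-- cannot be reproduced by the total getD ports and is excluded as well.
def Pre_run_detection_algorithm (allocation : List (List Int)) (request : List (List Int)) (available : List Int) : Prop :=
  ∀ p, p < allocation.length →
    available.length ≤ (allocation.getD p []).length ∧
    (¬ ((allocation.getD p []).take available.length).all (fun x => x == 0) = true →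
      p < request.length ∧ available.length ≤ (request.getD p []).length)
instance (allocation : List (List Int)) (request : List (List Int)) (available : List Int) : Decidable (Pre_run_detection_algorithm allocation request available) := by unfold Pre_run_detection_algorithm; infer_instance

def pvWitness_run_detection_algorithm : List (List Int) × List (List Int) × List Int :=
  ([[0, 1], [1, 0]], [[1, 0], [0, 2]], [1, 0])

def Spec_run_detection_algorithm (allocation : List (List Int)) (request : List (List Int)) (available : List Int) (out : Bool × List Int) : Prop := out = run_detection_algorithm_alt allocation request available
instance (allocation : List (List Int)) (request : List (List Int)) (available : List Int) (out : Bool × List Int) : Decidable (Spec_run_detection_algorithm allocation request available out) := by unfold Spec_run_detection_algorithm; infer_instance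

-- ===== CLAIM (what is proved, stated in full; the proofs are below) =====
def Claim_equal_run_detection_algorithm : Prop := ∀ (allocation : List (List Int)) (request : List (List Int)) (available : List Int), Dom_run_detection_algorithm allocation request available → Pre_run_detection_algorithm allocation request available → Spec_run_detection_algorithm allocation request available (run_detection_algorithm allocation request available)

-- ===== LEMMAS AND PROOFS =====

-- pending process indices corresponding to a finish list: unfinished members of range P
def pvPend (P : Nat) (f : List Bool) : List Nat :=
  (List.range P).filter (fun q => ! f.getD q false)

-- getD after set, spelled out
theorem pv_set_getD (f : List Bool) (p q : Nat) :
    (f.set p true).getD q false = if p = q ∧ p < f.length then true else f.getD q false := by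
  simp only [List.getD_eq_getElem?_getD, List.getElem?_set]
  by_cases h : p = q
  · subst h
    by_cases hl : p < f.length <;> simp [hl]
  · simp [h]

-- foldl pvStepA: length of the finish list is preserved
theorem pvFoldA_len (al re : List (List Int)) (l : List Nat) :
    ∀ (s : List Int × List Bool × Bool), ((l.foldl (pvStepA al re) s).2.1).length = s.2.1.length := by
  induction l with
  | nil => intro s; rfl
  | cons p l ih =>
    intro s
    simp only [List.foldl_cons]
    rw [ih]
    unfold pvStepA
    split_ifs <;> simp

-- foldl pvStepA: length of the work list is preserved
theorem pvFoldA_wlen (al re : List (List Int)) (l : List Nat) :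
    ∀ (s : List Int × List Bool × Bool), ((l.foldl (pvStepA al re) s).1).length = s.1.length := by
  induction l with
  | nil => intro s; rfl
  | cons p l ih =>
    intro s
    simp only [List.foldl_cons]
    rw [ih]
    unfold pvStepA
    split_ifs <;> simp [pvAddA]

-- finish entries at indices not in l are untouched
theorem pvFoldA_frame (al re : List (List Int)) (l : List Nat) :
    ∀ (s : List Int × List Bool × Bool) (q : Nat), q ∉ l →
      ((l.foldl (pvStepA al re) s).2.1).getD q false = s.2.1.getD q false := by
  induction l with
  | nil => intro s q _; rfl
  | cons p l ih =>
    intro s q hq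
    simp only [List.mem_cons, not_or] at hq
    simp only [List.foldl_cons]
    rw [ih _ _ hq.2]
    have hstep : ((pvStepA al re s p).2.1) = s.2.1 ∨
        ((pvStepA al re s p).2.1) = s.2.1.set p true := by
      unfold pvStepA
      split_ifs <;> simp
    rcases hstep with h | h
    · rw [h]
    · rw [h, pv_set_getD, if_neg]
      rintro ⟨h1, -⟩
      exact hq.1 h1.symm

-- true finish entries stay true
theorem pvFoldA_mono (al re : List (List Int)) (l : List Nat) :
    ∀ (s : List Int × List Bool × Bool) (q : Nat), s.2.1.getD q false = true →
      ((l.foldl (pvStepA al re) s).2.1).getD q false = true := by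
  induction l with
  | nil => intro s q h; exact h
  | cons p l ih =>
    intro s q h
    simp only [List.foldl_cons]
    apply ih
    have hstep : ((pvStepA al re s p).2.1) = s.2.1 ∨
        ((pvStepA al re s p).2.1) = s.2.1.set p true := by
      unfold pvStepA
      split_ifs <;> simp
    rcases hstep with h' | h'
    · rw [h']; exact h
    · rw [h', pv_set_getD]
      split_ifs with h''
      · rfl
      · exact h

-- a single A-step leaves other finish entries alone
theorem pvStepA_frame (al re : List (List Int)) (s : List Int × List Bool × Bool) (p q : Nat)
    (h : p ≠ q) : ((pvStepA al re s p).2.1).getD q false = s.2.1.getD q false := by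
  have hstep : ((pvStepA al re s p).2.1) = s.2.1 ∨ ((pvStepA al re s p).2.1) = s.2.1.set p true := by
    unfold pvStepA
    split_ifs <;> simp
  rcases hstep with h' | h'
  · rw [h']
  · rw [h', pv_set_getD, if_neg (fun hc => h hc.1)]

-- A's sweep over l only acts on the initially-unfinished members of l
theorem pvFoldA_skip (al re : List (List Int)) (l : List Nat) :
    ∀ (s : List Int × List Bool × Bool), l.Nodup →
      l.foldl (pvStepA al re) s
        = (l.filter (fun q => ! s.2.1.getD q false)).foldl (pvStepA al re) s := by
  induction l with
  | nil => intro s _; rfl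
  | cons p l ih =>
    intro s hnd
    have hpl : p ∉ l := (List.nodup_cons.mp hnd).1
    have hnd' : l.Nodup := (List.nodup_cons.mp hnd).2
    simp only [List.foldl_cons, List.filter_cons]
    by_cases hp : s.2.1.getD p false = true
    · -- p already finished: A's step is a skip, and p is filtered out
      have hskip : pvStepA al re s p = s := by
        unfold pvStepA
        rw [hp]
        simp
      rw [hp, hskip]
      simpa using ih s hnd'
    · have hp' : s.2.1.getD p false = false := by
        cases h : s.2.1.getD p false
        · rfl
        · exact absurd h hp
      have hfil : (if (!s.2.1.getD p false) = true
          then p :: List.filter (fun q => !s.2.1.getD q false) l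
          else List.filter (fun q => !s.2.1.getD q false) l)
          = p :: List.filter (fun q => !s.2.1.getD q false) l := by
        rw [hp']
        simp
      rw [hfil, List.foldl_cons, ih (pvStepA al re s p) hnd']
      exact congrArg (List.foldl (pvStepA al re) (pvStepA al re s p))
        (List.filter_congr (fun q hq => by
          rw [pvStepA_frame al re s p q (fun h => hpl (h ▸ hq))]))

-- one sweep of A versus one pass of B over the same pending worklist
theorem pv_pass_core (al re : List (List Int)) (n : Nat) :
    ∀ (es : List (Nat × Option Nat)) (w : List Int) (f : List Bool) (prog : Bool)
      (rem : List (Nat × Option Nat)),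
      w.length = n →
      (es.map Prod.fst).Nodup → (∀ e ∈ es, f.getD e.1 false = false) →
      (∀ e ∈ es, e.1 < f.length) →
      (∀ e ∈ es, ∀ w0, e.2 = some w0 → w0 < n) →
      ((es.map Prod.fst).foldl (pvStepA al re) (w, f, prog)).1
        = (es.foldl (pvStepB al re n) (w, rem, prog)).1 ∧
      (∃ es', (es.foldl (pvStepB al re n) (w, rem, prog)).2.1 = rem ++ es' ∧
        es'.map Prod.fst = (es.map Prod.fst).filter
          (fun q => ! ((es.map Prod.fst).foldl (pvStepA al re) (w, f, prog)).2.1.getD q false) ∧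
        (∀ e ∈ es', ∀ w0, e.2 = some w0 → w0 < n)) ∧
      ((es.map Prod.fst).foldl (pvStepA al re) (w, f, prog)).2.2
        = (es.foldl (pvStepB al re n) (w, rem, prog)).2.2 := by
  intro es
  induction es with
  | nil =>
    intro w f prog rem _ _ _ _ _
    exact ⟨rfl, ⟨[], by simp, by simp, by simp⟩, rfl⟩
  | cons e es ih =>
    intro w f prog rem hw hnd hfalse hlt hwv
    obtain ⟨p, wo⟩ := e
    have hpl : p ∉ es.map Prod.fst := by
      have := hnd
      simp only [List.map_cons] at this
      exact (List.nodup_cons.mp this).1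
    have hnd' : (es.map Prod.fst).Nodup := by
      have := hnd
      simp only [List.map_cons] at this
      exact (List.nodup_cons.mp this).2
    have hfp : f.getD p false = false := hfalse (p, wo) (List.mem_cons_self ..)
    have hplen : p < f.length := hlt (p, wo) (List.mem_cons_self ..)
    have hfalse' : ∀ e ∈ es, f.getD e.1 false = false :=
      fun e he => hfalse e (List.mem_cons_of_mem _ he)
    have hlt' : ∀ e ∈ es, e.1 < f.length := fun e he => hlt e (List.mem_cons_of_mem _ he)
    have hwv' : ∀ e ∈ es, ∀ w0, e.2 = some w0 → w0 < n :=
      fun e he => hwv e (List.mem_cons_of_mem _ he)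
    simp only [List.map_cons, List.foldl_cons]
    have hstepA : pvStepA al re (w, f, prog) p =
        (if pvSatA re w p then (pvAddA al w p, f.set p true, true) else (w, f, prog)) := by
      unfold pvStepA
      rw [hfp]
      simp
    -- the three cases of B's step
    by_cases hhit : pvWatchHit re w (p, wo) = true
    · -- watched resource still blocking: B skips the scan, A's test fails at the watch
      obtain ⟨w0, hwo⟩ : ∃ w0, wo = some w0 := by
        unfold pvWatchHit at hhit
        cases wo with
        | none => simp at hhit
        | some w0 => exact ⟨w0, rfl⟩
      have hw0n : w0 < n := hwv (p, wo) (List.mem_cons_self ..) w0 hwo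
      have hblk : w.getD w0 0 < (re.getD p []).getD w0 0 := by
        unfold pvWatchHit at hhit
        rw [hwo] at hhit
        simpa using hhit
      have hsat : pvSatA re w p = false := by
        unfold pvSatA
        rw [List.all_eq_false]
        refine ⟨w0, List.mem_range.mpr (by omega), ?_⟩
        intro hc
        simp only [decide_eq_true_eq] at hc
        omega
      have hstepB : pvStepB al re n (w, rem, prog) (p, wo) = (w, rem ++ [(p, wo)], prog) := by
        unfold pvStepB
        rw [if_pos hhit]
      rw [hstepA, hstepB, if_neg (by rw [hsat]; simp)]
      obtain ⟨h1, ⟨es', he1, he2, he3⟩, h3⟩ := ih w f prog (rem ++ [(p, wo)]) hw hnd' hfalse' hlt' hwv'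
      have hpfalse : ((es.map Prod.fst).foldl (pvStepA al re) (w, f, prog)).2.1.getD p false = false := by
        rw [pvFoldA_frame al re _ _ p hpl]
        exact hfp
      refine ⟨h1, ⟨(p, wo) :: es', by rw [he1, List.append_assoc]; rfl, ?_, ?_⟩, h3⟩
      · simp only [List.map_cons, List.filter_cons, hpfalse]
        rw [he2]
        simp
      · intro e he w1 hw1
        rcases List.mem_cons.mp he with h' | h'
        · subst h'
          have hx : wo = some w1 := hw1
          rw [hwo] at hx
          injection hx with hx'
          omega
        · exact he3 e h' w1 hw1
    · -- watch missed (or absent): B rescans the row exactly where A tests it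
      cases hscan : pvScanB re n w p with
      | none =>
        -- no blocking resource: both sides satisfy p and release its allocation
        have hsat : pvSatA re w p = true := by
          unfold pvSatA
          rw [List.all_eq_true]
          intro r hr
          rw [List.mem_range, hw] at hr
          have := List.find?_eq_none.mp hscan r (List.mem_range.mpr hr)
          simp only [decide_eq_true_eq] at this ⊢
          omega
        have hstepB : pvStepB al re n (w, rem, prog) (p, wo) = (pvAddB al n w p, rem, true) := by
          unfold pvStepB
          rw [if_neg hhit, hscan]
        have hadd : pvAddA al w p = pvAddB al n w p := by
          unfold pvAddA pvAddB
          rw [hw]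
        rw [hstepA, hstepB, if_pos hsat, hadd]
        have hwlen : (pvAddB al n w p).length = n := by
          unfold pvAddB
          simp
        have hfalse2 : ∀ e ∈ es, (f.set p true).getD e.1 false = false := by
          intro e he
          rw [pv_set_getD, if_neg ?_]
          · exact hfalse' e he
          · rintro ⟨hc1, -⟩
            exact hpl (by rw [hc1]; exact List.mem_map_of_mem he)
        have hlt2 : ∀ e ∈ es, e.1 < (f.set p true).length := by
          intro e he
          simpa using hlt' e he
        obtain ⟨h1, ⟨es', he1, he2, he3⟩, h3⟩ :=
          ih (pvAddB al n w p) (f.set p true) true rem hwlen hnd' hfalse2 hlt2 hwv'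
        have hptrue : ((es.map Prod.fst).foldl (pvStepA al re)
            (pvAddB al n w p, f.set p true, true)).2.1.getD p false = true := by
          apply pvFoldA_mono
          rw [pv_set_getD]
          simp [hplen]
        refine ⟨h1, ⟨es', he1, ?_, he3⟩, h3⟩
        · rw [he2]
          simp only [List.filter_cons, hptrue]
          simp
      | some r =>
        -- first blocking resource r: B keeps p with watch r, A's test fails at r
        have hrmem := List.find?_some hscan
        have hrn : r < n := by
          have := List.mem_range.mp (List.mem_of_find?_eq_some hscan)
          exact this
        have hblk : w.getD r 0 < (re.getD p []).getD r 0 := by simpa using hrmem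
        have hsat : pvSatA re w p = false := by
          unfold pvSatA
          rw [List.all_eq_false]
          refine ⟨r, List.mem_range.mpr (by omega), ?_⟩
          intro hc
          simp only [decide_eq_true_eq] at hc
          omega
        have hstepB : pvStepB al re n (w, rem, prog) (p, wo) = (w, rem ++ [(p, some r)], prog) := by
          unfold pvStepB
          rw [if_neg hhit, hscan]
        rw [hstepA, hstepB, if_neg (by rw [hsat]; simp)]
        obtain ⟨h1, ⟨es', he1, he2, he3⟩, h3⟩ :=
          ih w f prog (rem ++ [(p, some r)]) hw hnd' hfalse' hlt' hwv'
        have hpfalse : ((es.map Prod.fst).foldl (pvStepA al re) (w, f, prog)).2.1.getD p false = false := by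
          rw [pvFoldA_frame al re _ _ p hpl]
          exact hfp
        refine ⟨h1, ⟨(p, some r) :: es', by rw [he1, List.append_assoc]; rfl, ?_, ?_⟩, h3⟩
        · simp only [List.map_cons, List.filter_cons, hpfalse]
          rw [he2]
          simp
        · intro e he w1 hw1
          rcases List.mem_cons.mp he with h' | h'
          · subst h'
            injection hw1 with hw1'
            omega
          · exact he3 e h' w1 hw1

-- the two loops agree, pass by pass
theorem pv_loop_core (al re : List (List Int)) (n P : Nat) :
    ∀ (fuel : Nat) (w : List Int) (f : List Bool) (pend : List (Nat × Option Nat)),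
      w.length = n → f.length = P →
      pend.map Prod.fst = pvPend P f →
      (∀ e ∈ pend, ∀ w0, e.2 = some w0 → w0 < n) →
      ((pvLoopA al re P fuel w f).2).length = P ∧
      (pvLoopB al re n fuel w pend).map Prod.fst = pvPend P (pvLoopA al re P fuel w f).2 := by
  intro fuel
  induction fuel with
  | zero => intro w f pend _ hf hp _; exact ⟨hf, hp⟩
  | succ fuel ih =>
    intro w f pend hw hf hp hwv
    have hnd : (pend.map Prod.fst).Nodup := by
      rw [hp]
      exact List.Nodup.filter _ List.nodup_range
    have hmem : ∀ e ∈ pend, e.1 < P ∧ f.getD e.1 false = false := by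
      intro e he
      have : e.1 ∈ pvPend P f := hp ▸ List.mem_map_of_mem he
      unfold pvPend at this
      simp only [List.mem_filter, List.mem_range, Bool.not_eq_true'] at this
      exact this
    have hfalse : ∀ e ∈ pend, f.getD e.1 false = false := fun e he => (hmem e he).2
    have hlt : ∀ e ∈ pend, e.1 < f.length := fun e he => hf ▸ (hmem e he).1
    obtain ⟨h1, ⟨es', he1, he2, he3⟩, h3⟩ :=
      pv_pass_core al re n pend w f false [] hw hnd hfalse hlt hwv
    set a := (pend.map Prod.fst).foldl (pvStepA al re) (w, f, false) with ha
    set b := pend.foldl (pvStepB al re n) (w, [], false) with hb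
    have halen : a.2.1.length = P := by rw [ha, pvFoldA_len]; exact hf
    have hawlen : a.1.length = n := by rw [ha, pvFoldA_wlen]; exact hw
    have hamono : ∀ q, f.getD q false = true → a.2.1.getD q false = true := by
      intro q hq
      rw [ha]
      exact pvFoldA_mono al re _ _ q hq
    -- pending after the pass = what B collected in remaining
    have hpend : pvPend P a.2.1 = es'.map Prod.fst := by
      rw [he2, hp]
      unfold pvPend
      rw [List.filter_filter]
      apply List.filter_congr
      intro q _
      cases hfq : f.getD q false
      · simp
      · simpa using hamono q hfq
    have hA : pvLoopA al re P (fuel + 1) w f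
        = (if a.2.2 then pvLoopA al re P fuel a.1 a.2.1 else (a.1, a.2.1)) := by
      show (let s := pvPassA al re P w f;
        if s.2.2 then pvLoopA al re P fuel s.1 s.2.1 else (s.1, s.2.1)) = _
      have hPA : pvPassA al re P w f = a := by
        unfold pvPassA
        rw [pvFoldA_skip al re (List.range P) (w, f, false) List.nodup_range]
        rw [ha, hp]
        rfl
      rw [hPA]
    have hB : pvLoopB al re n (fuel + 1) w pend
        = (if b.2.2 then pvLoopB al re n fuel b.1 b.2.1 else b.2.1) := by
      show (let s := pend.foldl (pvStepB al re n) (w, [], false);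
        if s.2.2 then pvLoopB al re n fuel s.1 s.2.1 else s.2.1) = _
      rfl
    rw [hA, hB, ← h3]
    have hrem : b.2.1 = es' := by rw [hb] at he1; simpa using he1
    by_cases hprog : a.2.2 = true
    · rw [if_pos hprog, if_pos hprog, show b.1 = a.1 from h1.symm]
      apply ih a.1 a.2.1 b.2.1 hawlen halen
      · rw [hrem, ← hpend]
      · intro e he
        apply he3
        rw [← hrem]
        exact he
    · have hprog' : a.2.2 = false := by
        cases h : a.2.2
        · rfl
        · exact absurd h hprog
      rw [if_neg (by rw [hprog']; simp), if_neg (by rw [hprog']; simp)]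
      exact ⟨halen, by rw [hrem, ← hpend]⟩

-- the init fold of A, pointwise (z abstracts the all-zero test on a row)
theorem pv_init_getD (z : Nat → Bool) (l : List Nat) :
    ∀ (f : List Bool) (q : Nat),
      ((l.foldl (fun f p => if z p then f.set p true else f) f).getD q false)
        = (f.getD q false || (decide (q ∈ l) && decide (q < f.length) && z q)) := by
  induction l with
  | nil => intro f q; simp
  | cons p l ih =>
    intro f q
    simp only [List.foldl_cons]
    by_cases hz : z p = true
    · rw [if_pos hz, ih]
      rw [pv_set_getD]
      by_cases hpq : p = q
      · subst hpq
        by_cases hl : p < f.length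
        · simp [hl, hz]
        · simp [hl]
      · have hmem : (q ∈ p :: l) ↔ (q ∈ l) := by simp [List.mem_cons, Ne.symm hpq]
        simp only [List.length_set, hmem]
        rw [if_neg (fun h => hpq h.1)]
    · rw [if_neg hz, ih]
      by_cases hpq : p = q
      · subst hpq
        simp [hz]
      · have hmem : (q ∈ p :: l) ↔ (q ∈ l) := by simp [List.mem_cons, Ne.symm hpq]
        simp only [hmem]

theorem pv_init_len (z : Nat → Bool) (l : List Nat) :
    ∀ (f : List Bool),
      (l.foldl (fun f p => if z p then f.set p true else f) f).length = f.length := by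
  induction l with
  | nil => intro f; rfl
  | cons p l ih =>
    intro f
    simp only [List.foldl_cons]
    rw [ih]
    split_ifs <;> simp

-- all-zero over a truncated row versus any-nonzero over the resource range
theorem pv_row_zero (n : Nat) :
    ∀ (row : List Int),
      ((row.take n).all (fun x => x == 0))
        = ! ((List.range n).any (fun r => row.getD r 0 != 0)) := by
  induction n with
  | zero => intro row; simp
  | succ n ih =>
    intro row
    rw [List.range_succ_eq_map]
    cases row with
    | nil => simp
    | cons x xs =>
      simp only [List.take_succ_cons, List.all_cons, List.any_cons, List.any_map]
      rw [ih xs]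
      by_cases h0 : x = 0
      · simp [h0, Function.comp_def]
      · simp [Function.comp_def, bne]

-- ===== VERDICT (by name: the statement is the Claim_ definition above) =====
theorem run_detection_algorithm_spec : Claim_equal_run_detection_algorithm := by
  intro al re av _ _
  show run_detection_algorithm al re av = run_detection_algorithm_alt al re av
  unfold run_detection_algorithm run_detection_algorithm_alt
  simp only []
  set P := al.length with hP
  set f0 := (List.range P).foldl
    (fun f p => if ((al.getD p []).take av.length).all (fun x => x == 0) then f.set p true else f)
    (List.replicate P false) with hf0
  have hf0len : f0.length = P := by rw [hf0, pv_init_len]; simp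
  set pend0 := ((List.range P).filter
      (fun p => (List.range av.length).any (fun r => (al.getD p []).getD r 0 != 0))).map
      (fun p => (p, (none : Option Nat))) with hpend0def
  have hpend0 : pend0.map Prod.fst = pvPend P f0 := by
    rw [hpend0def, List.map_map,
      show (Prod.fst ∘ fun p : Nat => (p, (none : Option Nat))) = id from rfl, List.map_id]
    unfold pvPend
    apply List.filter_congr
    intro q hq
    have hqP : q < P := List.mem_range.mp hq
    rw [hf0, pv_init_getD (fun p => ((al.getD p []).take av.length).all (fun x => x == 0))]
    have h1 : (List.replicate P false).getD q false = false := by simp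
    have h2 : decide (q ∈ List.range P) = true := by simp [List.mem_range, hqP]
    have h3 : decide (q < (List.replicate P false).length) = true := by simp [hqP]
    rw [h1, h2, h3, pv_row_zero av.length (al.getD q [])]
    simp
  have hwv0 : ∀ e ∈ pend0, ∀ w0, e.2 = some w0 → w0 < av.length := by
    intro e he w0 hw0
    rw [hpend0def] at he
    simp only [List.mem_map] at he
    obtain ⟨x, -, hx⟩ := he
    rw [← hx] at hw0
    simp at hw0
  obtain ⟨hlen, hloop⟩ := pv_loop_core al re av.length P (P + 1) av f0 pend0 rfl hf0len hpend0 hwv0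
  rw [hlen]
  have hdead : ((List.range P).filter
      (fun p => ! (pvLoopA al re P (P + 1) av f0).2.getD p false)).map (fun p => Int.ofNat p)
      = (pvLoopB al re av.length (P + 1) av pend0).map (fun e => Int.ofNat e.1) := by
    have h1 : (fun e : Nat × Option Nat => Int.ofNat e.1)
        = (fun q : Nat => Int.ofNat q) ∘ Prod.fst := rfl
    rw [h1, ← List.map_map, hloop]
    rfl
  rw [hdead]
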